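-- pv_equiv track=rewrite | github.com/none-adi/Aditya_Raj_BCS_Sub | training.py | death_action
-- ===== SOURCE A (Python) =====
-- from collections import defaultdict, deque
--
-- def get_neighbors(pos, maze, cup_pos):
--     neighbors = []
--     x, y = pos
--     rows = len(maze)
--     cols = len(maze[0])
--
--     directions = [(-1, 0), (1, 0), (0, -1), (0, 1)]  # Up, Down, Left, Right
--
--     for dx, dy in directions:
--         nx, ny = x + dx, y + dy
--         # Check if the new position is within bounds and not a wall (assuming wall = 1)
--         if 0 <= nx < rows and 0 <= ny < cols and maze[nx][ny] != 1 and (nx,ny) != cup_pos: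
--             neighbors.append((nx, ny))
--
--     return neighbors
--
-- def death_action(maze, start, goal, cup_pos):
--     """
--     maze: 2D list with 0 (free space) and 1 (wall)
--     start: tuple (x, y) - Death Eater's current position
--     goal: tuple (x, y) - Harry's current position
--     Returns: tuple (x, y) - Next position Death Eater should move to
--     """
--     queue = deque()
--     queue.append(start)
--
--     came_from = {}  # To reconstruct path
--     came_from[start] = None
--
--     while queue:
--         current = queue.popleft()
--
--         # If we reached Harry's position
--         if current == goal:
--             break
--
--         for neighbor in get_neighbors(current, maze, cup_pos):
--             if neighbor not in came_from:  # Not visited yet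
--                 queue.append(neighbor)
--                 came_from[neighbor] = current
--
--     # Reconstruct the path from goal to start
--     if goal not in came_from:
--         return start  # No path found, stay in place
--
--     path = []
--     current = goal
--     while current != start:
--         path.append(current)
--         current = came_from[current]
--     path.reverse()  # From start to goal
--
--     # Return the first step in the path
--     return path[0] if path else start
-- ===== SOURCE B (Python) =====
-- from collections import deque
--
-- def death_action(maze, start, goal, cup_pos):
--     """BFS whose queue carries (cell, first-move-out-of-start) pairs: the
--     answer rides along with each discovered cell, so no parent-pointer map
--     and no backward path reconstruction are needed."""
--     queue = deque([(start, start)])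
--     seen = {start}
--     while queue:
--         node, step = queue.popleft()
--         if node == goal:
--             return step
--         x, y = node
--         for nx, ny in ((x - 1, y), (x + 1, y), (x, y - 1), (x, y + 1)):
--             if (0 <= nx < len(maze) and 0 <= ny < len(maze[0])
--                     and maze[nx][ny] != 1 and (nx, ny) != cup_pos
--                     and (nx, ny) not in seen):
--                 seen.add((nx, ny))
--                 queue.append(((nx, ny), (nx, ny) if node == start else step))
--     return start
-- ===== Notes on version B (the rewrite author's own statement) =====
-- stated objective: simpler
-- what changed: B's BFS queue carries (cell, first-move-out-of-start) pairs so the answer is dequeued directly with the goal; A's parent-pointer dict, the membership bookkeeping through it and the whole backward path-reconstruction loop disappear, and neighbour generation is fused into the loop instead of a staged helper.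
-- outside the precondition, e.g. on death_action([[1, 1], [1]], (-1, 0), (0, 0), (5, 5)): A returns (-1, 0), B returns (-1, 0)
import Mathlib
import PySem

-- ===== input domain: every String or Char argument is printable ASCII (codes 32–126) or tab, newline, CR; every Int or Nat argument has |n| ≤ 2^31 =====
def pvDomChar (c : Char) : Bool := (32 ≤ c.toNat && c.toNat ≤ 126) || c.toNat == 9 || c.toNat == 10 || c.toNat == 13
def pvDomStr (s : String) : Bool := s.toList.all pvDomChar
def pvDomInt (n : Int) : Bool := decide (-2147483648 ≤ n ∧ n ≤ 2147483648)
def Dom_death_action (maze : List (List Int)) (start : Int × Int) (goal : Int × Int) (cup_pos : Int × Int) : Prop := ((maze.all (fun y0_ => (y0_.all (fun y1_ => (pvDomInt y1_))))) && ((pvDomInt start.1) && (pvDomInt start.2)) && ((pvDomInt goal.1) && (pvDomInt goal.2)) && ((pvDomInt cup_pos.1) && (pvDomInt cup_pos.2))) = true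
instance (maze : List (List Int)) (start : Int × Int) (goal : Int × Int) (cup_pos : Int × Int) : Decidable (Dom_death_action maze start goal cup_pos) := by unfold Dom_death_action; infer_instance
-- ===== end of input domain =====

-- B's BFS queue carries (cell, first-move) pairs, so A's parent-pointer dict
-- and its whole backward path-reconstruction loop disappear (objective: simpler).

-- ===== PORT A =====
def pvDirs : List (Int × Int) := [(-1, 0), (1, 0), (0, -1), (0, 1)]

-- maze[nx][ny] ported with pyGetD; under Pre_death_action both indices are in
-- range wherever this lookup is reached, so the defaults are never used (they
-- mark exactly where Python would raise IndexError, which Pre_ excludes).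
def getNeighbors (pos : Int × Int) (maze : List (List Int)) (cup_pos : Int × Int) :
    List (Int × Int) :=
  let x := pos.1
  let y := pos.2
  let rows : Int := maze.length
  let cols : Int := (maze.headD []).length
  pvDirs.foldl (fun acc d =>
    if 0 ≤ x + d.1 ∧ x + d.1 < rows ∧ 0 ≤ y + d.2 ∧ y + d.2 < cols ∧
        PySem.List.pyGetD (PySem.List.pyGetD maze (x + d.1) []) (y + d.2) 1 ≠ 1 ∧
        (x + d.1, y + d.2) ≠ cup_pos
    then acc ++ [(x + d.1, y + d.2)] else acc) []

-- the BFS while-loop of A; Nat fuel (maze cells + 2, set at the call site)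
-- is an upper bound on the number of dequeues, so the 0 case is never reached
def bfsA (maze : List (List Int)) (goal : Int × Int) (cup_pos : Int × Int) :
    Nat → List (Int × Int) → PySem.Dict (Int × Int) (Option (Int × Int)) →
    PySem.Dict (Int × Int) (Option (Int × Int))
  | 0, _, cf => cf
  | f + 1, q, cf =>
    match q with
    | [] => cf
    | current :: q' =>
      if current = goal then cf
      else
        let st := (getNeighbors current maze cup_pos).foldl
          (fun (s : List (Int × Int) × PySem.Dict (Int × Int) (Option (Int × Int))) n =>
            if s.2.contains n then s
            else (s.1 ++ [n], s.2.insert n (some current)))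
          (q', cf)
        bfsA maze goal cup_pos f st.1 st.2

-- A's path-reconstruction while-loop; fuel = dict size bounds the chain length;
-- the `none` fallback marks the KeyError Python would raise, unreachable here
def reconLoop (cf : PySem.Dict (Int × Int) (Option (Int × Int))) (startp : Int × Int) :
    Nat → (Int × Int) → List (Int × Int) → List (Int × Int)
  | 0, _, path => path
  | f + 1, cur, path =>
    if cur = startp then path
    else
      match cf.getD cur none with
      | some p => reconLoop cf startp f p (path ++ [cur])
      | none => path ++ [cur]

def death_action (maze : List (List Int)) (start : Int × Int) (goal : Int × Int)
    (cup_pos : Int × Int) : Int × Int :=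
  let fuel := maze.length * (maze.headD []).length + 2
  let cf := bfsA maze goal cup_pos fuel [start] (PySem.Dict.empty.insert start none)
  if (cf.get? goal).isSome then
    let path := reconLoop cf start cf.size goal []
    match path.reverse with
    | [] => start
    | h :: _ => h
  else start

-- ===== PORT B =====
-- B's single loop: the queue holds (cell, first move out of start) pairs and
-- `seen` is Python's visited set; neighbour generation is inlined.  The fuel
-- (maze cells + 2, set at the call site) exceeds the possible number of
-- dequeues, so the 0 fallback — the label of `goal` if it is still waiting in
-- the queue, i.e. what the remaining dequeues would return — is never reached.
def bfsB (maze : List (List Int)) (startp : Int × Int) (goal : Int × Int)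
    (cup : Int × Int) :
    Nat → List ((Int × Int) × (Int × Int)) → PySem.Set (Int × Int) → Int × Int
  | 0, qp, _ =>
    match qp.find? (fun p => decide (p.1 = goal)) with
    | some p => p.2
    | none => startp
  | f + 1, qp, seen =>
    match qp with
    | [] => startp
    | (node, step) :: rest =>
      if node = goal then step
      else
        let st := ([(-1, 0), (1, 0), (0, -1), (0, 1)] : List (Int × Int)).foldl
          (fun (s : List ((Int × Int) × (Int × Int)) × PySem.Set (Int × Int)) d =>
            if 0 ≤ node.1 + d.1 ∧ node.1 + d.1 < (maze.length : Int) ∧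
                0 ≤ node.2 + d.2 ∧ node.2 + d.2 < ((maze.headD []).length : Int) ∧
                PySem.List.pyGetD (PySem.List.pyGetD maze (node.1 + d.1) []) (node.2 + d.2) 1 ≠ 1 ∧
                (node.1 + d.1, node.2 + d.2) ≠ cup ∧
                ¬ PySem.Set.contains s.2 (node.1 + d.1, node.2 + d.2)
            then (s.1 ++ [((node.1 + d.1, node.2 + d.2),
                    if node = startp then (node.1 + d.1, node.2 + d.2) else step)],
                  PySem.Set.add s.2 (node.1 + d.1, node.2 + d.2))
            else s)
          (rest, seen)
        bfsB maze startp goal cup f st.1 st.2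

def death_action_alt (maze : List (List Int)) (start : Int × Int) (goal : Int × Int)
    (cup_pos : Int × Int) : Int × Int :=
  bfsB maze start goal cup_pos (maze.length * (maze.headD []).length + 2)
    [(start, start)] (PySem.Set.add PySem.Set.empty start)

-- ===== PRECONDITION & SPEC =====
-- Pre_ excludes the inputs on which the Python may raise IndexError reading
-- maze[0] or maze[nx][ny]: empty or ragged mazes (a row shorter than row 0);
-- it keeps start = goal (no maze access) and a start all of whose four
-- neighbours are out of bounds (the loop then indexes nothing).  On some
-- excluded ragged mazes A still returns (its BFS never reaches a short row);
-- both programs return the same value there (see claim cites).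
def Pre_death_action (maze : List (List Int)) (start : Int × Int) (goal : Int × Int)
    (cup_pos : Int × Int) : Prop :=
  start = goal ∨
  (maze ≠ [] ∧ ∀ row ∈ maze, (maze.headD []).length ≤ row.length) ∨
  (maze ≠ [] ∧ ∀ d ∈ pvDirs,
    ¬(0 ≤ start.1 + d.1 ∧ start.1 + d.1 < (maze.length : Int) ∧
      0 ≤ start.2 + d.2 ∧ start.2 + d.2 < ((maze.headD []).length : Int)))
instance (maze : List (List Int)) (start : Int × Int) (goal : Int × Int) (cup_pos : Int × Int) : Decidable (Pre_death_action maze start goal cup_pos) := by unfold Pre_death_action; infer_instance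

def pvWitness_death_action : List (List Int) × (Int × Int) × (Int × Int) × (Int × Int) :=
  ([[0, 0], [0, 0]], (0, 0), (1, 1), (5, 5))

def Spec_death_action (maze : List (List Int)) (start : Int × Int) (goal : Int × Int) (cup_pos : Int × Int) (out : Int × Int) : Prop := out = death_action_alt maze start goal cup_pos
instance (maze : List (List Int)) (start : Int × Int) (goal : Int × Int) (cup_pos : Int × Int) (out : Int × Int) : Decidable (Spec_death_action maze start goal cup_pos out) := by unfold Spec_death_action; infer_instance

-- ===== CLAIM (what is proved, stated in full; the proofs are below) =====
def Claim_equal_death_action : Prop := ∀ (maze : List (List Int)) (start : Int × Int) (goal : Int × Int) (cup_pos : Int × Int), Dom_death_action maze start goal cup_pos → Pre_death_action maze start goal cup_pos → Spec_death_action maze start goal cup_pos (death_action maze start goal cup_pos)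

-- ===== LEMMAS AND PROOFS =====

-- `Good startp cf k s n`: k ≠ startp is a key of cf whose parent chain reaches
-- startp in n steps, and s is the chain's last node before startp (= the first
-- step out of startp on the BFS path to k).
inductive Good (startp : Int × Int) (cf : PySem.Dict (Int × Int) (Option (Int × Int))) :
    (Int × Int) → (Int × Int) → Nat → Prop
  | base (k : Int × Int) : k ≠ startp → cf.get? k = some (some startp) → Good startp cf k k 1
  | step (k p s : Int × Int) (n : Nat) : k ≠ startp → cf.get? k = some (some p) →
      p ≠ startp → Good startp cf p s n → Good startp cf k s (n + 1)

-- what holds of every (cell, first-move) pair in B's queue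
def PairOK (startp : Int × Int) (cf : PySem.Dict (Int × Int) (Option (Int × Int)))
    (p : (Int × Int) × (Int × Int)) : Prop :=
  (p.1 = startp ∧ p.2 = startp) ∨ ∃ n, Good startp cf p.1 p.2 n ∧ n + 1 ≤ cf.size

-- the joint invariant: A's queue is B's queue with the labels dropped
def BfsInv (startp goal : Int × Int) (cf : PySem.Dict (Int × Int) (Option (Int × Int)))
    (qp : List ((Int × Int) × (Int × Int))) (seen : PySem.Set (Int × Int)) : Prop :=
  cf.get? startp = some none ∧
  (∀ k, k ∈ seen ↔ (cf.get? k).isSome) ∧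
  (∀ p ∈ qp, PairOK startp cf p) ∧
  ((cf.get? goal).isSome → goal ∈ qp.map Prod.fst)

-- the dequeue-is-goal / fuel-out tail of A, as a function of the final dict
def finishA (startp goal : Int × Int)
    (cf : PySem.Dict (Int × Int) (Option (Int × Int))) : Int × Int :=
  if (cf.get? goal).isSome then
    match (reconLoop cf startp cf.size goal []).reverse with
    | [] => startp
    | h :: _ => h
  else startp

lemma good_cf {startp k s : Int × Int} {n : Nat}
    {cf : PySem.Dict (Int × Int) (Option (Int × Int))}
    (h : Good startp cf k s n) : (cf.get? k).isSome ∧ k ≠ startp := by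
  cases h with
  | base k hk hcf => exact ⟨by rw [hcf]; rfl, hk⟩
  | step k p s n hk hcf hp hg => exact ⟨by rw [hcf]; rfl, hk⟩

lemma good_insert {startp k s : Int × Int} {n : Nat}
    {cf : PySem.Dict (Int × Int) (Option (Int × Int))} {w : Int × Int}
    {v : Option (Int × Int)}
    (hw : cf.get? w = none)
    (h : Good startp cf k s n) : Good startp (cf.insert w v) k s n := by
  induction h with
  | base k hk hcf =>
    have hkw : k ≠ w := by intro e; rw [e, hw] at hcf; cases hcf
    exact Good.base k hk (by rw [PySem.Dict.get?_insert_of_ne (hne := hkw)]; exact hcf)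
  | step k p s n hk hcf hp hg ih =>
    have hkw : k ≠ w := by intro e; rw [e, hw] at hcf; cases hcf
    exact Good.step k p s n hk
      (by rw [PySem.Dict.get?_insert_of_ne (hne := hkw)]; exact hcf) hp ih

lemma dict_size_pos {cf : PySem.Dict (Int × Int) (Option (Int × Int))} {k : Int × Int}
    {v : Option (Int × Int)} (h : cf.get? k = some v) : 1 ≤ cf.size := by
  have hm := PySem.Dict.mem_items_of_get?_eq_some _ h
  have : cf.items ≠ [] := List.ne_nil_of_mem hm
  have := List.length_pos_iff.mpr this
  simpa [PySem.Dict.size] using this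

lemma pairOK_insert {startp : Int × Int} {cf : PySem.Dict (Int × Int) (Option (Int × Int))}
    {w : Int × Int} {v : Option (Int × Int)} {p : (Int × Int) × (Int × Int)}
    (hw : cf.get? w = none)
    (h : PairOK startp cf p) : PairOK startp (cf.insert w v) p := by
  rcases h with hs | ⟨n, hg, hb⟩
  · exact Or.inl hs
  · refine Or.inr ⟨n, good_insert hw hg, ?_⟩
    rw [PySem.Dict.size_insert]
    have : cf.contains w = false := by
      rw [PySem.Dict.contains_eq_isSome_get?, hw]; rfl
    rw [this]
    simp only [Bool.false_eq_true, if_false]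
    omega

lemma recon_start (cf : PySem.Dict (Int × Int) (Option (Int × Int))) (startp : Int × Int)
    (f : Nat) (acc : List (Int × Int)) : reconLoop cf startp f startp acc = acc := by
  cases f with
  | zero => rfl
  | succ f => simp [reconLoop]

lemma recon_good {startp : Int × Int} {cf : PySem.Dict (Int × Int) (Option (Int × Int))} :
    ∀ {k s : Int × Int} {n : Nat}, Good startp cf k s n →
    ∀ (f : Nat) (acc : List (Int × Int)), n + 1 ≤ f →
    ∃ l, reconLoop cf startp f k acc = acc ++ l ++ [s] := by
  intro k s n h
  induction h with
  | base k hk hcf =>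
    intro f acc hf
    match f, hf with
    | f + 2, _ =>
      refine ⟨[], ?_⟩
      simp [reconLoop, if_neg hk, PySem.Dict.getD_of_get?_eq_some _ _ hcf]
  | step k p s n hk hcf hp hg ih =>
    intro f acc hf
    match f, hf with
    | f + 1, _ =>
      simp only [reconLoop, if_neg hk, PySem.Dict.getD_of_get?_eq_some _ _ hcf]
      obtain ⟨l, hl⟩ := ih f (acc ++ [k]) (by omega)
      exact ⟨k :: l, by rw [hl]; simp⟩

-- a pair of B's queue determines A's reconstruction result for its cell
lemma pair_recon {startp : Int × Int} {cf : PySem.Dict (Int × Int) (Option (Int × Int))}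
    {p : (Int × Int) × (Int × Int)} (hp : PairOK startp cf p) :
    (match (reconLoop cf startp cf.size p.1 []).reverse with
      | [] => startp
      | h :: _ => h) = p.2 := by
  rcases hp with ⟨h1, h2⟩ | ⟨n, hg, hb⟩
  · rw [h1, recon_start, h2]; rfl
  · obtain ⟨l, hl⟩ := recon_good hg cf.size [] hb
    rw [hl]
    simp

-- the generic loop-shape fact: A first collects neighbours with appends, then
-- folds over the collected list; that equals one fold over the directions
lemma foldl_of_append_if {α β γ : Type} (P : γ → Prop) [DecidablePred P]
    (v : γ → β) (h : α → β → α) :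
    ∀ (l : List γ) (acc : List β) (s : α),
      ((l.foldl (fun a d => if P d then a ++ [v d] else a) acc).foldl h s)
        = l.foldl (fun a d => if P d then h a (v d) else a) (acc.foldl h s) := by
  intro l
  induction l with
  | nil => intro acc s; rfl
  | cons d l ih =>
    intro acc s
    simp only [List.foldl_cons]
    rw [ih]
    by_cases hP : P d
    · rw [if_pos hP, if_pos hP, List.foldl_append]
      rfl
    · rw [if_neg hP, if_neg hP]

-- one dequeue step's inner loop, in lockstep: A's fold over the collected
-- neighbour list (already rewritten to a fold over the directions) against B's
-- fused fold over the directions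
lemma fold_lock (maze : List (List Int)) (cup startp goal node step : Int × Int) :
    ∀ (dirs : List (Int × Int)) (rest : List ((Int × Int) × (Int × Int)))
      (cf : PySem.Dict (Int × Int) (Option (Int × Int))) (seen : PySem.Set (Int × Int)),
    BfsInv startp goal cf rest seen →
    (node = startp ∨ ∃ m, Good startp cf node step m ∧ m + 1 ≤ cf.size) →
    ∃ (rest2 : List ((Int × Int) × (Int × Int)))
      (cf2 : PySem.Dict (Int × Int) (Option (Int × Int))) (seen2 : PySem.Set (Int × Int)),
      dirs.foldl (fun (a : List (Int × Int) × PySem.Dict (Int × Int) (Option (Int × Int))) d =>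
          if 0 ≤ node.1 + d.1 ∧ node.1 + d.1 < (maze.length : Int) ∧
              0 ≤ node.2 + d.2 ∧ node.2 + d.2 < ((maze.headD []).length : Int) ∧
              PySem.List.pyGetD (PySem.List.pyGetD maze (node.1 + d.1) []) (node.2 + d.2) 1 ≠ 1 ∧
              (node.1 + d.1, node.2 + d.2) ≠ cup
          then (if a.2.contains (node.1 + d.1, node.2 + d.2) then a
                else (a.1 ++ [(node.1 + d.1, node.2 + d.2)],
                      a.2.insert (node.1 + d.1, node.2 + d.2) (some node)))
          else a) (rest.map Prod.fst, cf) = (rest2.map Prod.fst, cf2) ∧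
      dirs.foldl (fun (s : List ((Int × Int) × (Int × Int)) × PySem.Set (Int × Int)) d =>
          if 0 ≤ node.1 + d.1 ∧ node.1 + d.1 < (maze.length : Int) ∧
              0 ≤ node.2 + d.2 ∧ node.2 + d.2 < ((maze.headD []).length : Int) ∧
              PySem.List.pyGetD (PySem.List.pyGetD maze (node.1 + d.1) []) (node.2 + d.2) 1 ≠ 1 ∧
              (node.1 + d.1, node.2 + d.2) ≠ cup ∧
              ¬ PySem.Set.contains s.2 (node.1 + d.1, node.2 + d.2)
          then (s.1 ++ [((node.1 + d.1, node.2 + d.2),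
                  if node = startp then (node.1 + d.1, node.2 + d.2) else step)],
                PySem.Set.add s.2 (node.1 + d.1, node.2 + d.2))
          else s) (rest, seen) = (rest2, seen2) ∧
      BfsInv startp goal cf2 rest2 seen2 ∧
      (node = startp ∨ ∃ m, Good startp cf2 node step m ∧ m + 1 ≤ cf2.size) := by
  intro dirs
  induction dirs with
  | nil => intro rest cf seen hinv hcur; exact ⟨rest, cf, seen, rfl, rfl, hinv, hcur⟩
  | cons d dirs ih =>
    intro rest cf seen hinv hcur
    obtain ⟨h1, h2, h3, h4⟩ := hinv
    simp only [List.foldl_cons]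
    by_cases hC : 0 ≤ node.1 + d.1 ∧ node.1 + d.1 < (maze.length : Int) ∧
        0 ≤ node.2 + d.2 ∧ node.2 + d.2 < ((maze.headD []).length : Int) ∧
        PySem.List.pyGetD (PySem.List.pyGetD maze (node.1 + d.1) []) (node.2 + d.2) 1 ≠ 1 ∧
        (node.1 + d.1, node.2 + d.2) ≠ cup
    · by_cases hn : (cf.get? (node.1 + d.1, node.2 + d.2)).isSome
      · -- already visited: both sides skip
        have hA : cf.contains (node.1 + d.1, node.2 + d.2) = true := by
          rw [PySem.Dict.contains_eq_isSome_get?, hn]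
        have hB : PySem.Set.contains seen (node.1 + d.1, node.2 + d.2) = true := by
          rw [PySem.Set.contains_iff]; exact (h2 _).mpr hn
        rw [if_pos hC, if_pos hA, if_neg (by rw [hB]; simp)]
        exact ih rest cf seen ⟨h1, h2, h3, h4⟩ hcur
      · -- fresh: both sides push
        have hn' : cf.get? (node.1 + d.1, node.2 + d.2) = none :=
          Option.not_isSome_iff_eq_none.mp hn
        have hA : cf.contains (node.1 + d.1, node.2 + d.2) = false := by
          rw [PySem.Dict.contains_eq_isSome_get?, hn']; rfl
        have hB : ¬ PySem.Set.contains seen (node.1 + d.1, node.2 + d.2) = true := by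
          rw [PySem.Set.contains_iff]; intro hmem; exact hn ((h2 _).mp hmem)
        rw [if_pos hC, if_neg (by rw [hA]; simp), if_pos ⟨hC.1, hC.2.1, hC.2.2.1,
          hC.2.2.2.1, hC.2.2.2.2.1, hC.2.2.2.2.2, hB⟩]
        have hns : (node.1 + d.1, node.2 + d.2) ≠ startp := by
          intro e; rw [e, h1] at hn'; cases hn'
        have hsize : (cf.insert (node.1 + d.1, node.2 + d.2) (some node)).size
            = cf.size + 1 := by
          rw [PySem.Dict.size_insert, hA]
          simp
        have hstart1 : 1 ≤ cf.size := dict_size_pos h1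
        -- PairOK for the freshly pushed pair, in the new dict
        have hpnew : PairOK startp (cf.insert (node.1 + d.1, node.2 + d.2) (some node))
            ((node.1 + d.1, node.2 + d.2),
              if node = startp then (node.1 + d.1, node.2 + d.2) else step) := by
          by_cases hc : node = startp
          · refine Or.inr ⟨1, ?_, by rw [hsize]; omega⟩
            rw [if_pos hc]
            exact Good.base _ hns (by rw [PySem.Dict.get?_insert_self, hc])
          · rcases hcur with hcs | ⟨m, hg, hb⟩
            · exact absurd hcs hc
            · refine Or.inr ⟨m + 1, ?_, by rw [hsize]; omega⟩
              simp only [if_neg hc]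
              exact Good.step _ node step m hns (PySem.Dict.get?_insert_self _ _ _) hc
                (good_insert hn' hg)
        have hinv' : BfsInv startp goal (cf.insert (node.1 + d.1, node.2 + d.2) (some node))
            (rest ++ [((node.1 + d.1, node.2 + d.2),
              if node = startp then (node.1 + d.1, node.2 + d.2) else step)])
            (PySem.Set.add seen (node.1 + d.1, node.2 + d.2)) := by
          refine ⟨?_, ?_, ?_, ?_⟩
          · rw [PySem.Dict.get?_insert_of_ne (hne := Ne.symm hns)]; exact h1
          · intro k
            rw [PySem.Set.mem_add, PySem.Dict.get?_insert]
            by_cases hk : k = (node.1 + d.1, node.2 + d.2)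
            · simp [hk]
            · simp [hk, h2 k]
          · intro p hp
            rcases List.mem_append.mp hp with hpr | hpn
            · exact pairOK_insert hn' (h3 p hpr)
            · rw [List.mem_singleton.mp hpn]; exact hpnew
          · intro hsome
            rw [PySem.Dict.get?_insert] at hsome
            rw [List.map_append]
            by_cases hkg : goal = (node.1 + d.1, node.2 + d.2)
            · exact List.mem_append.mpr (Or.inr (by simp [hkg]))
            · rw [if_neg hkg] at hsome
              exact List.mem_append.mpr (Or.inl (h4 hsome))
        have hcur' : node = startp ∨ ∃ m,
            Good startp (cf.insert (node.1 + d.1, node.2 + d.2) (some node)) node step m ∧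
              m + 1 ≤ (cf.insert (node.1 + d.1, node.2 + d.2) (some node)).size := by
          rcases hcur with hcs | ⟨m, hg, hb⟩
          · exact Or.inl hcs
          · exact Or.inr ⟨m, good_insert hn' hg, by rw [hsize]; omega⟩
        obtain ⟨r2, c2, s2, hA2, hB2, hi2, hc2⟩ := ih _ _ _ hinv' hcur'
        refine ⟨r2, c2, s2, ?_, hB2, hi2, hc2⟩
        rw [← hA2]
        congr 1
        simp
    · -- out of bounds / wall / cup: both sides skip
      rw [if_neg hC, if_neg (by intro h; exact hC ⟨h.1, h.2.1, h.2.2.1, h.2.2.2.1,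
        h.2.2.2.2.1, h.2.2.2.2.2.1⟩)]
      exact ih rest cf seen ⟨h1, h2, h3, h4⟩ hcur

-- PairOK of any queue pair for `goal` forces goal discovered in cf
lemma pair_goal_some {startp goal : Int × Int}
    {cf : PySem.Dict (Int × Int) (Option (Int × Int))} {p : (Int × Int) × (Int × Int)}
    (h1 : cf.get? startp = some none) (hp : PairOK startp cf p) (hg : p.1 = goal) :
    (cf.get? goal).isSome := by
  rcases hp with ⟨hs, _⟩ | ⟨n, hgood, _⟩
  · rw [← hg, hs, h1]; rfl
  · rw [← hg]; exact (good_cf hgood).1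

-- the two BFS loops in lockstep, with A's epilogue folded in
lemma bfs_lock (maze : List (List Int)) (cup startp goal : Int × Int) :
    ∀ (f : Nat) (qp : List ((Int × Int) × (Int × Int)))
      (cf : PySem.Dict (Int × Int) (Option (Int × Int))) (seen : PySem.Set (Int × Int)),
    BfsInv startp goal cf qp seen →
    bfsB maze startp goal cup f qp seen
      = finishA startp goal (bfsA maze goal cup f (qp.map Prod.fst) cf) := by
  intro f
  induction f with
  | zero =>
    intro qp cf seen hinv
    obtain ⟨h1, h2, h3, h4⟩ := hinv
    simp only [bfsB, bfsA, finishA]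
    by_cases hg : (cf.get? goal).isSome
    · have hmem := h4 hg
      obtain ⟨p, hpmem, hpg⟩ := List.exists_of_mem_map hmem
      have hsome : (qp.find? (fun q => decide (q.1 = goal))).isSome :=
        List.find?_isSome.mpr ⟨p, hpmem, decide_eq_true hpg⟩
      obtain ⟨p', hfind⟩ := Option.isSome_iff_exists.mp hsome
      have hp'g : p'.1 = goal := by
        have hb := List.find?_some hfind
        simp only [decide_eq_true_eq] at hb
        exact hb
      rw [hfind, if_pos hg, ← hp'g,
        pair_recon (h3 p' (List.mem_of_find?_eq_some hfind))]
    · have hfind : qp.find? (fun p => decide (p.1 = goal)) = none := by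
        rw [List.find?_eq_none]
        intro p hp hdg
        exact hg (pair_goal_some h1 (h3 p hp) (of_decide_eq_true hdg))
      rw [hfind, if_neg hg]
  | succ f ih =>
    intro qp cf seen hinv
    obtain ⟨h1, h2, h3, h4⟩ := hinv
    match qp with
    | [] =>
      simp only [bfsB, bfsA, List.map_nil, finishA]
      rw [if_neg (by intro hg; exact absurd (h4 hg) (by simp))]
    | (node, step) :: rest =>
      by_cases hg : node = goal
      · simp only [bfsB, bfsA, List.map_cons, if_pos hg]
        have hgs : (cf.get? goal).isSome :=
          pair_goal_some h1 (h3 (node, step) List.mem_cons_self) hg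
        simp only [finishA, if_pos hgs]
        rw [← hg, pair_recon (h3 (node, step) List.mem_cons_self)]
      · have hinv' : BfsInv startp goal cf rest seen := by
          refine ⟨h1, h2, fun p hp => h3 p (List.mem_cons_of_mem _ hp), fun hs => ?_⟩
          rcases List.mem_cons.mp (h4 hs) with he | hm
          · exact absurd he.symm hg
          · exact hm
        have hcur : node = startp ∨ ∃ m, Good startp cf node step m ∧ m + 1 ≤ cf.size := by
          rcases h3 (node, step) List.mem_cons_self with ⟨hs, _⟩ | ⟨m, hgd, hb⟩
          · exact Or.inl hs
          · exact Or.inr ⟨m, hgd, hb⟩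
        obtain ⟨r2, c2, s2, hA2, hB2, hi2, _⟩ :=
          fold_lock maze cup startp goal node step
            [(-1, 0), (1, 0), (0, -1), (0, 1)] rest cf seen hinv' hcur
        simp only [bfsB, bfsA, List.map_cons, if_neg hg]
        have hgn : (getNeighbors (node, step).1 maze cup).foldl
            (fun (s : List (Int × Int) × PySem.Dict (Int × Int) (Option (Int × Int))) n =>
              if s.2.contains n then s
              else (s.1 ++ [n], s.2.insert n (some node)))
            (rest.map Prod.fst, cf) = (r2.map Prod.fst, c2) := by
          rw [show (getNeighbors (node, step).1 maze cup) = pvDirs.foldl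
            (fun acc d =>
              if 0 ≤ node.1 + d.1 ∧ node.1 + d.1 < (maze.length : Int) ∧
                  0 ≤ node.2 + d.2 ∧ node.2 + d.2 < ((maze.headD []).length : Int) ∧
                  PySem.List.pyGetD (PySem.List.pyGetD maze (node.1 + d.1) [])
                    (node.2 + d.2) 1 ≠ 1 ∧ (node.1 + d.1, node.2 + d.2) ≠ cup
              then acc ++ [(node.1 + d.1, node.2 + d.2)] else acc) [] from rfl]
          rw [foldl_of_append_if]
          simpa only [pvDirs, List.foldl_nil] using hA2
        rw [hgn, hB2]
        exact ih r2 c2 s2 hi2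
      
theorem death_action_spec : Claim_equal_death_action := by
  intro maze start goal cup_pos _ _
  unfold Spec_death_action
  have hinit : BfsInv start goal (PySem.Dict.empty.insert start none)
      [(start, start)] (PySem.Set.add PySem.Set.empty start) := by
    refine ⟨PySem.Dict.get?_insert_self _ _ _, ?_, ?_, ?_⟩
    · intro k
      rw [PySem.Set.mem_add, PySem.Dict.get?_insert]
      by_cases hk : k = start <;> simp [hk, PySem.Set.empty, PySem.Dict.get?_empty]
    · intro p hp
      rw [List.mem_singleton.mp hp]
      exact Or.inl ⟨rfl, rfl⟩
    · intro hs
      rw [PySem.Dict.get?_insert] at hs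
      by_cases hk : goal = start
      · simp [hk]
      · rw [if_neg hk, PySem.Dict.get?_empty] at hs
        cases hs
  have h := bfs_lock maze cup_pos start goal (maze.length * (maze.headD []).length + 2)
    [(start, start)] (PySem.Dict.empty.insert start none)
    (PySem.Set.add PySem.Set.empty start) hinit
  simp only [List.map_cons, List.map_nil] at h
  simp only [death_action, death_action_alt, finishA] at h ⊢
  rw [h]
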